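-- pv_equiv track=rewrite | github.com/joshanashakya/dissertation | workspace/dataset/java-python/GeeksForGeeks/4259/A/2.py | maxRowDiff
-- ===== SOURCE A (Python) =====
-- def maxRowDiff(mat, m, n):
--
--     # auxiliary array to store sum of
--     # all elements of each row
--     rowSum = [0] * m
--
--     # calculate sum of each row and
--     # store it in rowSum array
--     for i in range(0, m):
--         sum = 0
--         for j in range(0, n):
--             sum += mat[i][j]
--         rowSum[i] = sum
--
--     # calculating maximum difference of
--     # two elements such that
--     # rowSum[i]<rowsum[j]
--     max_diff = rowSum[1] - rowSum[0]
--     min_element = rowSum[0]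
--
--     for i in range(1, m):
--
--         # if current difference is greater
--         # than previous then update it
--         if (rowSum[i] - min_element > max_diff):
--             max_diff = rowSum[i] - min_element
--
--         # if new element is less than previous
--         # minimum element then update it so
--         # that we may get maximum difference
--         # in remaining array
--         if (rowSum[i] < min_element):
--             min_element = rowSum[i]
--     return max_diff
-- ===== SOURCE B (Python) =====
-- def maxRowDiff(mat, m, n):
--     sums = [sum(mat[i][j] for j in range(n)) for i in range(m)]
--     best = cur = sums[1] - sums[0]
--     prev = sums[1]
--     for x in sums[2:]:
--         cur = (x - prev) + max(cur, 0)
--         best = max(best, cur)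
--         prev = x
--     return best
-- ===== Notes on version B (the rewrite author's own statement) =====
-- stated objective: alternative
-- what changed: B replaces A's running-minimum-prefix scan over the row sums by a maximum-subarray (Kadane) scan over the consecutive differences of the row sums, computed on the fly from the previous element.
import Mathlib
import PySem

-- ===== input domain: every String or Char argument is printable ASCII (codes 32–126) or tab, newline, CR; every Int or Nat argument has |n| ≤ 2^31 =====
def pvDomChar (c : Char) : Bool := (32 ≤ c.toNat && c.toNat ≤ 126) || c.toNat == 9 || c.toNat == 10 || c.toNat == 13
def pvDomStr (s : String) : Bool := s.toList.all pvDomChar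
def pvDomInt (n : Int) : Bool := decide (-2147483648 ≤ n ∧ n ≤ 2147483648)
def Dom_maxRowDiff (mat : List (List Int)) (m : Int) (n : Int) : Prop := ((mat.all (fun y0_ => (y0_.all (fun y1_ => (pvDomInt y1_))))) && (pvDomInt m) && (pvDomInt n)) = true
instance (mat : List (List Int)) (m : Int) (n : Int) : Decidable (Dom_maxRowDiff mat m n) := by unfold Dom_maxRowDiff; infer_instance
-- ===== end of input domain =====

-- B computes the same maximal increasing row-sum difference by a Kadane scan over
-- consecutive row-sum differences instead of A's running-minimum scan (alternative decomposition).

-- ===== PORT A =====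
def maxRowDiff (mat : List (List Int)) (m : Int) (n : Int) : Int :=
  -- rowSum[i] = sum over j in range(n) of mat[i][j]; a Python list is an array,
  -- so rowSum is an Array (indices read in the second loop are nonnegative and in range on Pre_)
  let rowSum : Array Int := ((PySem.List.pyRange 0 m 1).map (fun i =>
    (PySem.List.pyRange 0 n 1).foldl
      (fun s j => s + PySem.List.pyGetD (PySem.List.pyGetD mat i []) j 0) 0)).toArray
  let maxDiff0 := rowSum.getD 1 0 - rowSum.getD 0 0
  let res := (PySem.List.pyRange 1 m 1).foldl
    (fun (st : Int × Int) i =>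
      (if rowSum.getD i.toNat 0 - st.2 > st.1 then rowSum.getD i.toNat 0 - st.2 else st.1,
       if rowSum.getD i.toNat 0 < st.2 then rowSum.getD i.toNat 0 else st.2))
    (maxDiff0, rowSum.getD 0 0)
  res.1

-- ===== PORT B =====
def maxRowDiff_alt (mat : List (List Int)) (m : Int) (n : Int) : Int :=
  let sums : List Int := (PySem.List.pyRange 0 m 1).map (fun i =>
    ((PySem.List.pyRange 0 n 1).map
      (fun j => PySem.List.pyGetD (PySem.List.pyGetD mat i []) j 0)).sum)
  let best0 := PySem.List.pyGetD sums 1 0 - PySem.List.pyGetD sums 0 0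
  -- state (best, cur, prev)
  let res := (PySem.List.slice sums (some 2) none).foldl
    (fun (st : Int × Int × Int) x =>
      ((max st.1 ((x - st.2.2) + max st.2.1 0)), (x - st.2.2) + max st.2.1 0, x))
    (best0, best0, PySem.List.pyGetD sums 1 0)
  res.1

-- ===== PRECONDITION & SPEC =====
-- Pre_ is exactly where the Python A returns: m ≥ 2 rows requested (rowSum[1] exists) and,
-- when n > 0 (the inner range(n) loop actually indexes), m rows present and each of the
-- first m rows long enough for it.
def Pre_maxRowDiff (mat : List (List Int)) (m : Int) (n : Int) : Prop :=
  2 ≤ m ∧ (n ≤ 0 ∨ (m ≤ (mat.length : Int) ∧ ∀ row ∈ mat.take m.toNat, n ≤ (row.length : Int)))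
instance (mat : List (List Int)) (m : Int) (n : Int) : Decidable (Pre_maxRowDiff mat m n) := by
  unfold Pre_maxRowDiff; infer_instance
def pvWitness_maxRowDiff : List (List Int) × Int × Int := ([[1, 2], [3, 4]], 2, 2)

def Spec_maxRowDiff (mat : List (List Int)) (m : Int) (n : Int) (out : Int) : Prop := out = maxRowDiff_alt mat m n
instance (mat : List (List Int)) (m : Int) (n : Int) (out : Int) : Decidable (Spec_maxRowDiff mat m n out) := by unfold Spec_maxRowDiff; infer_instance

-- ===== CLAIM (what is proved, stated in full; the proofs are below) =====
def Claim_equal_maxRowDiff : Prop := ∀ (mat : List (List Int)) (m : Int) (n : Int), Dom_maxRowDiff mat m n → Pre_maxRowDiff mat m n → Spec_maxRowDiff mat m n (maxRowDiff mat m n)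

-- ===== LEMMAS AND PROOFS =====

-- A's min-tracking loop over the remaining row sums equals B's Kadane loop over the
-- same elements with the consecutive difference taken on the fly (x = last processed element).
theorem loop_eq (t : List Int) (x md cur : Int) :
    (t.foldl (fun (st : Int × Int) y =>
        (if y - st.2 > st.1 then y - st.2 else st.1, if y < st.2 then y else st.2))
      (md, x - max cur 0)).1
    = (t.foldl (fun (st : Int × Int × Int) y =>
        ((max st.1 ((y - st.2.2) + max st.2.1 0)), (y - st.2.2) + max st.2.1 0, y))
      (md, cur, x)).1 := by
  induction t generalizing x md cur with
  | nil => rfl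
  | cons y t ih =>
    simp only [List.foldl_cons]
    have hA : ((if y - (x - max cur 0) > md then y - (x - max cur 0) else md,
               if y < x - max cur 0 then y else x - max cur 0) : Int × Int)
        = (max md (y - x + max cur 0), y - max (y - x + max cur 0) 0) := by
      rw [Prod.mk.injEq]
      constructor <;> (split_ifs <;> omega)
    rw [hA]
    have := ih y (max md (y - x + max cur 0)) (y - x + max cur 0)
    simpa using this

theorem maxRowDiff_eq (mat : List (List Int)) (m : Int) (n : Int)
    (hpre : Pre_maxRowDiff mat m n) : maxRowDiff mat m n = maxRowDiff_alt mat m n := by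
  obtain ⟨hm2, -⟩ := hpre
  -- the two row-sum lists coincide: A's inner loop is the sum of B's comprehension
  have hsums : (PySem.List.pyRange 0 m 1).map (fun i =>
        (PySem.List.pyRange 0 n 1).foldl
          (fun s j => s + PySem.List.pyGetD (PySem.List.pyGetD mat i []) j 0) 0)
      = (PySem.List.pyRange 0 m 1).map (fun i =>
        ((PySem.List.pyRange 0 n 1).map
          (fun j => PySem.List.pyGetD (PySem.List.pyGetD mat i []) j 0)).sum) := by
    apply List.map_congr_left
    intro i _
    rw [PySem.List.foldl_add _ (fun j => PySem.List.pyGetD (PySem.List.pyGetD mat i []) j 0) 0,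
        zero_add]
  simp only [maxRowDiff, maxRowDiff_alt, hsums]
  set s : List Int := (PySem.List.pyRange 0 m 1).map (fun i =>
      ((PySem.List.pyRange 0 n 1).map
        (fun j => PySem.List.pyGetD (PySem.List.pyGetD mat i []) j 0)).sum) with hs
  have hlen : (s.length : Int) = m := by
    simp only [hs, List.length_map, PySem.List.length_pyRange_one]; omega
  have hlen2 : 2 ≤ s.length := by omega
  rcases s with _ | ⟨a, s'⟩
  · simp at hlen2
  rcases s' with _ | ⟨b, t⟩
  · simp at hlen2
  -- A side: array reads are list reads, then turn the indexed loop into a fold over b :: t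
  have hlen' : ((t.length : Int)) + 2 = m := by
    have h := hlen; simp only [List.length_cons] at h; omega
  have hArr : ∀ (k : Nat) (h : k < (a :: b :: t).length),
      (a :: b :: t).toArray.getD k 0 = (a :: b :: t)[k]'h := by
    intro k h
    simp only [Array.getD, List.size_toArray]
    rw [dif_pos h]
    simp
  have h0 : (a :: b :: t).toArray.getD 0 0 = a := hArr 0 (by simp)
  have h1 : (a :: b :: t).toArray.getD 1 0 = b := hArr 1 (by simp)
  have hloop : (PySem.List.pyRange 1 m 1).foldl
      (fun (st : Int × Int) i =>
        (if (a :: b :: t).toArray.getD i.toNat 0 - st.2 > st.1 then (a :: b :: t).toArray.getD i.toNat 0 - st.2 else st.1,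
         if (a :: b :: t).toArray.getD i.toNat 0 < st.2 then (a :: b :: t).toArray.getD i.toNat 0 else st.2))
      ((a :: b :: t).toArray.getD 1 0 - (a :: b :: t).toArray.getD 0 0, (a :: b :: t).toArray.getD 0 0)
    = (PySem.List.pyRange 1 m 1).foldl
      (fun (st : Int × Int) i =>
        (if PySem.List.pyGetD (a :: b :: t) i 0 - st.2 > st.1 then PySem.List.pyGetD (a :: b :: t) i 0 - st.2 else st.1,
         if PySem.List.pyGetD (a :: b :: t) i 0 < st.2 then PySem.List.pyGetD (a :: b :: t) i 0 else st.2))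
      ((a :: b :: t).toArray.getD 1 0 - (a :: b :: t).toArray.getD 0 0, (a :: b :: t).toArray.getD 0 0) := by
    apply PySem.List.foldl_congr_mem
    intro st i hi
    rw [PySem.List.mem_pyRange_one] at hi
    have hx : (a :: b :: t).toArray.getD i.toNat 0 = PySem.List.pyGetD (a :: b :: t) i 0 := by
      rw [hArr i.toNat (by simp only [List.length_cons]; omega),
          PySem.List.pyGetD_eq_getElem _ _ (by omega) (by rw [hlen]; exact hi.2)]
    rw [hx]
  rw [hloop, h0, h1, ← hlen, PySem.List.foldl_pyRange_pyGetD' (a :: b :: t) 0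
      (fun (st : Int × Int) x =>
        (if x - st.2 > st.1 then x - st.2 else st.1, if x < st.2 then x else st.2))
      _ (by omega : (0:Int) ≤ 1)]
  -- B side: sums[0], sums[1] and the tail sums[2:]
  rw [PySem.List.slice_from (a :: b :: t) (by omega : (0:Int) ≤ 2),
      show List.drop ((2:Int).toNat) (a :: b :: t) = t from rfl,
      PySem.List.pyGetD_zero_cons,
      show PySem.List.pyGetD (a :: b :: t) 1 0 = b from by
        rw [PySem.List.pyGetD_eq_getElem _ _ (by omega) (by simp)]; rfl,
      show List.drop (Int.toNat 1) (a :: b :: t) = b :: t from rfl, List.foldl_cons]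
  have hstep : ((if b - a > b - a then b - a else b - a, if b < a then b else a) : Int × Int)
      = (b - a, b - max (b - a) 0) := by
    rw [Prod.mk.injEq]; constructor <;> (split_ifs <;> omega)
  rw [hstep]
  exact loop_eq t b (b - a) (b - a)

-- ===== VERDICT (by name: the statement is the Claim_ definition above) =====
theorem maxRowDiff_spec : Claim_equal_maxRowDiff := by
  intro mat m n _ hpre
  unfold Spec_maxRowDiff
  exact maxRowDiff_eq mat m n hpre
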